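-- pv_equiv track=rewrite | github.com/guiwecgdiu/EverythingFromBDIC | 大三下半年/Information Retrieval/Information retrieval/week4/worksheet/q4.py | mergeOR
-- ===== SOURCE A (Python) =====
-- def mergeOR(list1, list2):
-- 	answer=[]
-- 	p1=0
-- 	p2=0
-- 	while p1 != len(list1) and p2 != len(list2):
-- 		if list1[p1] == list2[p2]:
-- 			answer.append(list1[p1])
-- 		else:
-- 			answer.append(list2[p2])
-- 			answer.append(list1[p1])
-- 		p1+=1
-- 		p2+=1
-- 	return sorted(answer)
-- ===== SOURCE B (Python) =====
-- def mergeOR(list1, list2):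
--     # Count multiplicities per value instead of building and sorting the whole list:
--     # each lockstep pair contributes one copy of x, plus one copy of y when they differ.
--     counts = {}
--     for x, y in zip(list1, list2):
--         counts[x] = counts.get(x, 0) + 1
--         if x != y:
--             counts[y] = counts.get(y, 0) + 1
--     answer = []
--     for v in sorted(counts):
--         answer += [v] * counts[v]
--     return answer
-- ===== Notes on version B (the rewrite author's own statement) =====
-- stated objective: alternative
-- what changed: Replaced A's build-a-flat-list-then-sort lockstep loop by a counting-dict algorithm: one pass over the zipped pairs accumulates per-value multiplicities, then the output is emitted by expanding each value along the sorted distinct keys, with no sort of the full list.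
import Mathlib
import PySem

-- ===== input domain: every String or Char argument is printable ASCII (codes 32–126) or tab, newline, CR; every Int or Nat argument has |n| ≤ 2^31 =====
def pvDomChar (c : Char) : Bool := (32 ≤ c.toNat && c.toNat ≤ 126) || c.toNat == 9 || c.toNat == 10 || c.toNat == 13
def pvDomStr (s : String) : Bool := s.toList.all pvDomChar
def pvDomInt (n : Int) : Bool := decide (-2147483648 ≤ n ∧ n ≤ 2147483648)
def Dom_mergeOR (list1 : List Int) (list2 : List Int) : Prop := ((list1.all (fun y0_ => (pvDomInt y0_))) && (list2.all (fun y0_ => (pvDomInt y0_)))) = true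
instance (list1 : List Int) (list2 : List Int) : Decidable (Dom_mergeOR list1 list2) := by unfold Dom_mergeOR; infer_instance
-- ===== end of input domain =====

-- B replaces A's build-then-sort lockstep loop by a per-value counting dict expanded along its
-- sorted distinct keys (objective: alternative algorithm; same asymptotic cost).

-- ===== PORT A =====
-- lockstep loop of A: walk both lists together, one element for an equal pair, two (list2's first) otherwise
def mergeORLoop : List Int → List Int → List Int
  | a :: t1, b :: t2 =>
      (if a = b then [a] else [b, a]) ++ mergeORLoop t1 t2
  | _, _ => []

def mergeOR (list1 : List Int) (list2 : List Int) : List Int :=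
  PySem.List.sorted (mergeORLoop list1 list2) (fun x => x) false

-- ===== PORT B =====
-- per-pair counting step of B: bump the count of x, and of y too when the pair is unequal
def mergeORCount (d : PySem.Dict Int Int) (p : Int × Int) : PySem.Dict Int Int :=
  let d1 := d.insert p.1 (d.getD p.1 0 + 1)
  if p.1 ≠ p.2 then d1.insert p.2 (d1.getD p.2 0 + 1) else d1

def mergeOR_alt (list1 : List Int) (list2 : List Int) : List Int :=
  let counts := (list1.zip list2).foldl mergeORCount PySem.Dict.empty
  (PySem.List.sorted counts.keys (fun v => v) false).foldl
    (fun ans v => ans ++ List.replicate (counts.getD v 0).toNat v) []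

-- ===== PRECONDITION & SPEC =====
def Spec_mergeOR (list1 : List Int) (list2 : List Int) (out : List Int) : Prop := out = mergeOR_alt list1 list2
instance (list1 : List Int) (list2 : List Int) (out : List Int) : Decidable (Spec_mergeOR list1 list2 out) := by unfold Spec_mergeOR; infer_instance

-- ===== CLAIM (what is proved, stated in full; the proofs are below) =====
def Claim_equal_mergeOR : Prop := ∀ (list1 : List Int) (list2 : List Int), Dom_mergeOR list1 list2 → Spec_mergeOR list1 list2 (mergeOR list1 list2)

-- ===== LEMMAS AND PROOFS =====

-- the multiset both programs produce, as one flat list (x first, then y when unequal)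
def mergeORFlat (ps : List (Int × Int)) : List Int :=
  ps.flatMap (fun p => if p.1 = p.2 then [p.1] else [p.1, p.2])

lemma mergeORLoop_perm_flat (l1 l2 : List Int) :
    (mergeORLoop l1 l2).Perm (mergeORFlat (l1.zip l2)) := by
  induction l1 generalizing l2 with
  | nil => cases l2 <;> simp [mergeORLoop, mergeORFlat]
  | cons a t1 ih =>
    cases l2 with
    | nil => simp [mergeORLoop, mergeORFlat]
    | cons b t2 =>
      by_cases h : a = b
      · simpa [mergeORLoop, mergeORFlat, h] using (ih t2).cons a
      · have := ((ih t2).cons b).cons a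
        simpa [mergeORLoop, mergeORFlat, h, List.Perm.swap' a b] using
          (List.Perm.swap a b _).trans this

lemma counts_eq_counter (ps : List (Int × Int)) (d : PySem.Dict Int Int) :
    ps.foldl mergeORCount d =
      (mergeORFlat ps).foldl (fun d x => d.insert x (d.getD x 0 + 1)) d := by
  induction ps generalizing d with
  | nil => simp [mergeORFlat]
  | cons p t ih =>
    by_cases h : p.1 = p.2 <;>
      simp [mergeORFlat, mergeORCount, h, List.foldl_cons, ih]

lemma count_flat_expand (L : List Int) (a : Int) (ks : List Int) (hnd : ks.Nodup) :
    (ks.flatMap (fun v => List.replicate (L.count v) v)).count a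
      = if a ∈ ks then L.count a else 0 := by
  induction ks with
  | nil => simp
  | cons k t ih =>
    simp only [List.flatMap_cons, List.count_append, List.count_replicate]
    have hnd' := hnd
    rw [List.nodup_cons] at hnd'
    by_cases h : k = a
    · have : a ∉ t := h ▸ hnd'.1
      simp [h, ih hnd'.2, this]
    · simp [h, ih hnd'.2, List.mem_cons, Ne.symm h]

lemma pairwise_flat_expand (L : List Int) (ks : List Int) (hlt : ks.Pairwise (· < ·)) :
    (ks.flatMap (fun v => List.replicate (L.count v) v)).Pairwise (· ≤ ·) := by
  induction ks with
  | nil => simp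
  | cons k t ih =>
    rw [List.pairwise_cons] at hlt
    simp only [List.flatMap_cons]
    rw [List.pairwise_append]
    refine ⟨List.pairwise_replicate.2 (Or.inr le_rfl), ih hlt.2, ?_⟩
    intro a ha b hb
    have ha' := List.eq_of_mem_replicate ha
    rcases List.mem_flatMap.1 hb with ⟨v, hv, hbv⟩
    have hb' := List.eq_of_mem_replicate hbv
    rw [ha', hb']
    exact (hlt.1 v hv).le

lemma sorted_eq_expand (L : List Int) :
    PySem.List.sorted L (fun x => x) false =
      (PySem.List.sorted (PySem.Set.ofList L) (fun v => v) false).flatMap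
        (fun v => List.replicate (L.count v) v) := by
  set ks := PySem.List.sorted (PySem.Set.ofList L) (fun v => v) false with hks
  have hnd : ks.Nodup := (PySem.List.sorted_perm _ _ _).nodup_iff.2 (PySem.Set.nodup_ofList L)
  have hmem : ∀ v, v ∈ ks ↔ v ∈ L := by
    intro v
    simp [hks, PySem.List.mem_sorted, PySem.Set.mem_ofList]
  have hperm : (ks.flatMap (fun v => List.replicate (L.count v) v)).Perm L := by
    refine List.perm_iff_count.2 (fun a => ?_)
    rw [count_flat_expand L a ks hnd]
    by_cases h : a ∈ ks
    · simp [h]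
    · have : a ∉ L := fun hc => h ((hmem a).2 hc)
      simp [h, List.count_eq_zero_of_not_mem this]
  exact PySem.List.sorted_id_eq_of_perm_of_pairwise _ _ hperm
    (pairwise_flat_expand L ks (hks ▸ PySem.List.sorted_ofList_pairwise_lt L))

-- ===== VERDICT (by name: the statement is the Claim_ definition above) =====
theorem mergeOR_spec : Claim_equal_mergeOR := by
  intro l1 l2 _
  unfold Spec_mergeOR
  simp only [mergeOR, mergeOR_alt]
  have hc : (l1.zip l2).foldl mergeORCount PySem.Dict.empty
      = PySem.Dict.counter (mergeORFlat (l1.zip l2)) := by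
    rw [counts_eq_counter]
    exact PySem.Dict.foldl_insert_getD_add_one_eq_counter _
  rw [hc, PySem.Dict.keys_counter]
  have hA : PySem.List.sorted (mergeORLoop l1 l2) (fun x => x) false
      = PySem.List.sorted (mergeORFlat (l1.zip l2)) (fun x => x) false :=
    (PySem.List.sorted_id_eq_sorted_id_iff_perm _ _).2 (mergeORLoop_perm_flat l1 l2)
  rw [hA, sorted_eq_expand]
  rw [PySem.List.foldl_append_eq_flatMap]
  simp [PySem.Dict.getD_counter]
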